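-- pv_equiv track=rewrite | github.com/biggaben/Crackernaut | cuda_ml.py | extract_pattern_clusters
-- ===== SOURCE A (Python) =====
-- from collections import defaultdict
-- from typing import List, Tuple, Dict, Set
--
-- def extract_pattern_clusters(passwords: List[str], min_cluster_size: int = 3) -> Dict[str, List[str]]:
--     """Group passwords by common structural patterns."""
--     pattern_map = defaultdict(list)
--
--     for password in passwords:
--         if not password:
--             continue
--
--         # Create a structural fingerprint (e.g., "LLLDDDS" for "abc123!")
--         pattern = ''.join('L' if c.isalpha() else
--                          'D' if c.isdigit() else
--                          'S' for c in password)
--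
--         # Add length information to the pattern
--         length_pattern = f"{pattern}_{len(password)}"
--         pattern_map[length_pattern].append(password)
--
--     # Return only patterns with sufficient examples
--     return {k: v for k, v in pattern_map.items() if len(v) >= min_cluster_size}
-- ===== SOURCE B (Python) =====
-- from collections import Counter
--
-- def extract_pattern_clusters(passwords, min_cluster_size=3):
--     """Count fingerprints first, then collect only qualifying passwords in one pass."""
--     def _fingerprint(p):
--         pattern = ''.join('L' if c.isalpha() else
--                           'D' if c.isdigit() else
--                           'S' for c in p)
--         return f"{pattern}_{len(p)}"
--
--     counts = Counter(_fingerprint(p) for p in passwords if p)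
--     clusters = {}
--     for p in passwords:
--         if not p:
--             continue
--         key = _fingerprint(p)
--         if counts[key] >= min_cluster_size:
--             clusters.setdefault(key, []).append(p)
--     return clusters
-- ===== Notes on version B (the rewrite author's own statement) =====
-- stated objective: alternative
-- what changed: Replaces collect-all-then-filter (defaultdict of lists plus a dict-comprehension filter) by count-then-collect: a Counter of fingerprints is built first, then a single pass appends only passwords whose fingerprint count reaches min_cluster_size, so no non-qualifying cluster list is ever materialized.
import Mathlib
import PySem

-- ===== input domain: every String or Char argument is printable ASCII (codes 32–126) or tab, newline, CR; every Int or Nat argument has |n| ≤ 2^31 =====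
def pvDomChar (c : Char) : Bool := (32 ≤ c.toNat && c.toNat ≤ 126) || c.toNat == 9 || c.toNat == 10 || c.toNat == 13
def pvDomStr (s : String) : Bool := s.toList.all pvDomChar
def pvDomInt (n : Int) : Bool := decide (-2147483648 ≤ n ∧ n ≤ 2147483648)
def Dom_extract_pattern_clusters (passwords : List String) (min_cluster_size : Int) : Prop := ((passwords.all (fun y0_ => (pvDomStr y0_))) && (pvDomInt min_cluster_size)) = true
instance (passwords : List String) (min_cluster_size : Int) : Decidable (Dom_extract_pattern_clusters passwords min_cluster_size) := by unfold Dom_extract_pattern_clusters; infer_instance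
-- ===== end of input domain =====

-- B replaces A's collect-all-then-filter grouping by count-then-collect (Counter first, then one
-- collecting pass that only appends qualifying passwords); same return value, similar cost.

-- the structural fingerprint f"{pattern}_{len(password)}" (identical code in both Pythons)
def pvPatChar (c : Char) : Char :=
  if PySem.Chars.isalpha c then 'L' else if PySem.Chars.isdigit c then 'D' else 'S'

def pvFingerprint (p : String) : String :=
  String.ofList (p.toList.map pvPatChar ++ '_' :: PySem.Int.toChars (PySem.Str.len p))

-- ===== PORT A =====
def extract_pattern_clusters (passwords : List String) (min_cluster_size : Int) : List (String × List String) :=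
  let pattern_map : PySem.Dict String (List String) :=
    passwords.foldl (fun d password =>
      if password = "" then d         -- if not password: continue
      else d.modify (pvFingerprint password) [] (fun v => v ++ [password]))  -- defaultdict append
      PySem.Dict.empty
  -- {k: v for k, v in pattern_map.items() if len(v) >= min_cluster_size}
  (pattern_map.items.foldl (fun r kv =>
      if min_cluster_size ≤ (kv.2.length : Int) then r.insert kv.1 kv.2 else r)
    (PySem.Dict.empty : PySem.Dict String (List String))).items

-- ===== PORT B =====
def extract_pattern_clusters_alt (passwords : List String) (min_cluster_size : Int) : List (String × List String) :=
  -- counts = Counter(_fingerprint(p) for p in passwords if p)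
  let counts : PySem.Dict String Int :=
    PySem.Dict.counter ((passwords.filter (fun p => !decide (p = ""))).map pvFingerprint)
  let clusters : PySem.Dict String (List String) :=
    passwords.foldl (fun d p =>
      if p = "" then d                -- if not p: continue
      else if min_cluster_size ≤ counts.getD (pvFingerprint p) 0 then
        d.modify (pvFingerprint p) [] (fun v => v ++ [p])   -- clusters.setdefault(key, []).append(p)
      else d) PySem.Dict.empty
  clusters.items

-- ===== PRECONDITION & SPEC =====
def Spec_extract_pattern_clusters (passwords : List String) (min_cluster_size : Int) (out : List (String × List String)) : Prop := out = extract_pattern_clusters_alt passwords min_cluster_size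
instance (passwords : List String) (min_cluster_size : Int) (out : List (String × List String)) : Decidable (Spec_extract_pattern_clusters passwords min_cluster_size out) := by unfold Spec_extract_pattern_clusters; infer_instance

-- ===== CLAIM (what is proved, stated in full; the proofs are below) =====
def Claim_equal_extract_pattern_clusters : Prop := ∀ (passwords : List String) (min_cluster_size : Int), Dom_extract_pattern_clusters passwords min_cluster_size → Spec_extract_pattern_clusters passwords min_cluster_size (extract_pattern_clusters passwords min_cluster_size)

-- ===== LEMMAS AND PROOFS =====

-- 'for x in l: if not x-is-empty: act' = a fold over the non-empty elements
theorem pv_foldl_skip_empty {β : Type} (l : List String) (g : β → String → β) (init : β) :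
    l.foldl (fun acc p => if p = "" then acc else g acc p) init
      = (l.filter (fun p => !decide (p = ""))).foldl g init := by
  have h : (fun (acc : β) (p : String) => if p = "" then acc else g acc p)
      = fun acc p => if (!decide (p = "")) = true then g acc p else acc := by
    funext acc p; by_cases hp : p = "" <;> simp [hp]
  rw [h, PySem.List.foldl_if_eq_foldl_filter]

-- one step of B's guarded collecting loop keeps its dict equal to the filtered A-side dict
theorem pv_step (c : String → Int) (m : Int) (k p : String)
    (dG dB : PySem.Dict String (List String)) (hnd : dG.keys.Nodup)
    (h : dB.items = dG.items.filter (fun kv => decide (m ≤ c kv.1))) :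
    (if m ≤ c k then dB.modify k [] (fun v => v ++ [p]) else dB).items
      = (dG.modify k [] (fun v => v ++ [p])).items.filter (fun kv => decide (m ≤ c kv.1)) := by
  have hkeysB : dB.keys = (dG.items.filter (fun kv => decide (m ≤ c kv.1))).map (fun q => q.1) := by
    rw [← h]; rfl
  have hndB : dB.keys.Nodup := by
    rw [hkeysB]
    exact (List.filter_sublist.map (fun q : String × List String => q.1)).nodup hnd
  have hmodG : dG.modify k [] (fun v => v ++ [p]) = dG.insert k (dG.getD k [] ++ [p]) := rfl
  have hmodB : dB.modify k [] (fun v => v ++ [p]) = dB.insert k (dB.getD k [] ++ [p]) := rfl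
  by_cases hc : dG.contains k = true
  · obtain ⟨v0, hv0⟩ : ∃ v, dG.get? k = some v := by
      have hs := (PySem.Dict.contains_eq_isSome_get? dG k) ▸ hc
      exact Option.isSome_iff_exists.mp hs
    have hGgetD : dG.getD k [] = v0 := PySem.Dict.getD_of_get?_eq_some dG [] hv0
    have hmemG : (k, v0) ∈ dG.items := PySem.Dict.mem_items_of_get?_eq_some dG hv0
    by_cases hm : m ≤ c k
    · have hmemB : (k, v0) ∈ dB.items := by
        rw [h]; exact List.mem_filter.mpr ⟨hmemG, by simpa using hm⟩
      have hcB : dB.contains k = true :=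
        (PySem.Dict.contains_iff_mem_keys dB k).mpr (PySem.Dict.mem_keys_of_mem_items dB hmemB)
      have hBgetD : dB.getD k [] = v0 := PySem.Dict.getD_of_mem_items dB hmemB hndB []
      rw [if_pos hm, hmodB, hmodG, PySem.Dict.items_insert_of_contains dB _ hcB,
        PySem.Dict.items_insert_of_contains dG _ hc, hBgetD, hGgetD, h, List.filter_map]
      have hcongr : ∀ q ∈ dG.items,
          ((fun kv : String × List String => decide (m ≤ c kv.1)) ∘
            (fun q => if (q.1 == k) = true then (k, v0 ++ [p]) else q)) q
            = decide (m ≤ c q.1) := by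
        intro q _
        by_cases hqk : (q.1 == k) = true
        · have : q.1 = k := by simpa using hqk
          simp [this]
        · have hne : ¬ q.1 = k := by simpa using hqk
          simp [hne]
      rw [List.filter_congr hcongr]
    · rw [if_neg hm, hmodG, PySem.Dict.items_insert_of_contains dG _ hc, hGgetD, List.filter_map]
      have hcongr : ∀ q ∈ dG.items,
          ((fun kv : String × List String => decide (m ≤ c kv.1)) ∘
            (fun q => if (q.1 == k) = true then (k, v0 ++ [p]) else q)) q
            = decide (m ≤ c q.1) := by
        intro q _
        by_cases hqk : (q.1 == k) = true
        · have : q.1 = k := by simpa using hqk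
          simp [this]
        · have hne : ¬ q.1 = k := by simpa using hqk
          simp [hne]
      rw [List.filter_congr hcongr, h]
      have hid : ∀ q ∈ dG.items.filter (fun kv : String × List String => decide (m ≤ c kv.1)),
          (fun q : String × List String => if (q.1 == k) = true then (k, v0 ++ [p]) else q) q = q := by
        intro q hq
        have hcq : m ≤ c q.1 := by simpa using (List.of_mem_filter hq)
        have hqk : (q.1 == k) = false := by
          by_contra hqk'
          have : q.1 = k := by simpa using (Bool.not_eq_false _ ▸ hqk' : (q.1 == k) = true)
          exact hm (this ▸ hcq)
        simp [hqk]
      rw [List.map_congr_left hid]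
      simp
  · have hcG : dG.contains k = false := by simpa using hc
    have hknG : ¬ k ∈ dG.keys := fun hk => hc ((PySem.Dict.contains_iff_mem_keys dG k).mpr hk)
    have hsub : dB.keys ⊆ dG.keys := by
      rw [hkeysB]; intro x hx
      obtain ⟨q, hq, rfl⟩ := List.mem_map.mp hx
      exact PySem.Dict.mem_keys_of_mem_items dG (List.mem_of_mem_filter hq)
    have hcB : dB.contains k = false := by
      cases hb : dB.contains k with
      | false => rfl
      | true => exact absurd (hsub ((PySem.Dict.contains_iff_mem_keys dB k).mp hb)) hknG
    rw [hmodG, PySem.Dict.items_insert_of_not_contains dG _ hcG,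
      PySem.Dict.getD_of_not_contains dG [] hcG, List.filter_append]
    by_cases hm : m ≤ c k
    · rw [if_pos hm, hmodB, PySem.Dict.items_insert_of_not_contains dB _ hcB,
        PySem.Dict.getD_of_not_contains dB [] hcB, h]
      simp [hm]
    · rw [if_neg hm, h]
      simp [hm]

-- the invariant of pv_step carried through the whole loop
theorem pv_fold (c : String → Int) (m : Int) (l : List String) :
    ∀ (dG dB : PySem.Dict String (List String)), dG.keys.Nodup →
      dB.items = dG.items.filter (fun kv => decide (m ≤ c kv.1)) →
      (l.foldl (fun d p => if m ≤ c (pvFingerprint p) then d.modify (pvFingerprint p) [] (fun v => v ++ [p]) else d) dB).items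
        = (l.foldl (fun d p => d.modify (pvFingerprint p) [] (fun v => v ++ [p])) dG).items.filter (fun kv => decide (m ≤ c kv.1)) := by
  induction l with
  | nil => intro dG dB _ h; simpa using h
  | cons p t ih =>
    intro dG dB hnd h
    simp only [List.foldl_cons]
    have hnd' : (dG.modify (pvFingerprint p) [] (fun v => v ++ [p])).keys.Nodup := by
      have := PySem.Dict.nodup_keys_foldl_modify_key [p] pvFingerprint []
        (fun _ q => fun v => v ++ [q]) dG hnd
      simpa using this
    exact ih _ _ hnd' (pv_step c m (pvFingerprint p) p dG dB hnd h)

-- A's dict comprehension over a nodup-keyed dict is List.filter on its items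
theorem pv_A_filter (m : Int) (M : PySem.Dict String (List String)) (hnd : M.keys.Nodup) :
    (M.items.foldl (fun r kv =>
        if m ≤ (kv.2.length : Int) then r.insert kv.1 kv.2 else r)
      (PySem.Dict.empty : PySem.Dict String (List String))).items
      = M.items.filter (fun kv => decide (m ≤ (kv.2.length : Int))) := by
  rw [PySem.List.foldl_ite_eq_foldl_filter]
  have hfold := PySem.Dict.items_foldl_insert_fresh
    (M.items.filter (fun kv => decide (m ≤ (kv.2.length : Int))))
    (fun kv => kv.1) (fun kv => kv.2) PySem.Dict.empty
    (fun a _ => rfl)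
    ((List.filter_sublist.map (fun kv : String × List String => kv.1)).nodup hnd)
  simpa using hfold

-- the grouped dict's entry at k is exactly the passwords with fingerprint k
theorem pv_getD_group (l : List String) (k : String) :
    ((l.foldl (fun d p => d.modify (pvFingerprint p) [] (fun v => v ++ [p])) PySem.Dict.empty).getD k [])
      = l.filter (fun p => pvFingerprint p == k) := by
  have hmap : l.foldl (fun d p => d.modify (pvFingerprint p) [] (fun v => v ++ [p])) PySem.Dict.empty
      = (l.map (fun p => (pvFingerprint p, p))).foldl
          (fun d q => d.modify q.1 [] (fun v => v ++ [q.2])) PySem.Dict.empty := by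
    rw [List.foldl_map]
  rw [hmap, PySem.Dict.getD_foldl_modify_append, List.filter_map, List.map_map]
  simp [Function.comp_def]

-- the Counter's entry at k is that group's length
theorem pv_counter_len (l : List String) (k : String) :
    (PySem.Dict.counter (l.map pvFingerprint)).getD k 0
      = ((l.filter (fun p => pvFingerprint p == k)).length : Int) := by
  rw [PySem.Dict.getD_counter, List.count_eq_countP, List.countP_map,
    List.countP_eq_length_filter]
  rfl

-- ===== VERDICT (by name: the statement is the Claim_ definition above) =====
theorem extract_pattern_clusters_spec : Claim_equal_extract_pattern_clusters := by
  intro passwords m _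
  unfold Spec_extract_pattern_clusters extract_pattern_clusters extract_pattern_clusters_alt
  simp only [pv_foldl_skip_empty]
  set P := passwords.filter (fun p => !decide (p = "")) with hP
  set M := P.foldl (fun d p => d.modify (pvFingerprint p) [] (fun v => v ++ [p])) PySem.Dict.empty with hM
  have hndM : M.keys.Nodup := by
    rw [hM]
    exact PySem.Dict.nodup_keys_foldl_modify_key P pvFingerprint []
      (fun _ p => fun v => v ++ [p]) PySem.Dict.empty (by simp)
  have hB := pv_fold (fun k => (PySem.Dict.counter (P.map pvFingerprint)).getD k 0) m P
    PySem.Dict.empty PySem.Dict.empty (by simp) rfl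
  rw [pv_A_filter m M hndM, hB, ← hM]
  apply List.filter_congr
  intro kv hkv
  have hval : M.getD kv.1 [] = kv.2 := PySem.Dict.getD_of_mem_items M hkv hndM []
  have hc : (PySem.Dict.counter (P.map pvFingerprint)).getD kv.1 0 = ((kv.2.length : Int)) := by
    rw [pv_counter_len, ← pv_getD_group P kv.1, ← hM, hval]
  simp [hc]
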